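-- pv_equiv track=rewrite | github.com/Polyethylenekjc/Sparse-Transformer-In-Streamflow-Prediction | streamlit_circuit_viz.py | _expand_with_neighbors
-- ===== SOURCE A (Python) =====
-- from typing import Any, Dict, List, Set, Tuple
--
-- def _node_visual_layer(node_name: str) -> int:
--     if node_name.startswith("IN:"):
--         return -1
--     if node_name.startswith("OUT:"):
--         return 10_000
--     if node_name.startswith("L") and "." in node_name:
--         try:
--             block = int(node_name.split(".")[0][1:])
--         except Exception:
--             block = 0
--         if ".H" in node_name:
--             return block * 2
--         if ".N" in node_name:
--             return block * 2 + 1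
--         return block * 2
--     return 0
--
-- def _expand_with_neighbors(selected: Set[str], edges: List[Tuple[str, str]]) -> Set[str]:
--     if not selected:
--         return set()
--     preds: Dict[str, Set[str]] = {}
--     succs: Dict[str, Set[str]] = {}
--     for s, t in edges:
--         preds.setdefault(t, set()).add(s)
--         succs.setdefault(s, set()).add(t)
--
--     out = set(selected)
--
--     # 仅向上游追溯到 IN：不在中途反向扩展
--     up_visited = set(selected)
--     up_queue = list(selected)
--     while up_queue:
--         cur = up_queue.pop(0)
--         cur_layer = _node_visual_layer(cur)
--         for p in preds.get(cur, set()):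
--             if _node_visual_layer(p) == cur_layer:
--                 continue
--             if p in up_visited:
--                 continue
--             up_visited.add(p)
--             out.add(p)
--             if not p.startswith("IN:"):
--                 up_queue.append(p)
--
--     # 仅向下游延伸到 OUT：不在中途反向扩展
--     down_visited = set(selected)
--     down_queue = list(selected)
--     while down_queue:
--         cur = down_queue.pop(0)
--         cur_layer = _node_visual_layer(cur)
--         for s in succs.get(cur, set()):
--             if _node_visual_layer(s) == cur_layer:
--                 continue
--             if s in down_visited:
--                 continue
--             down_visited.add(s)
--             out.add(s)
--             if not s.startswith("OUT:"):
--                 down_queue.append(s)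
--     return out
-- ===== SOURCE B (Python) =====
-- # B: drops A's preds/succs dict indexes and its single FIFO queue; each closure is
-- # computed by a bounded number of level-synchronous rounds (len(edges)+1 rounds always
-- # suffice, since every productive round visits at least one new edge endpoint), each
-- # round rescanning the raw edges list per frontier node.
-- def _node_visual_layer(node_name: str) -> int:
--     if node_name.startswith("IN:"):
--         return -1
--     if node_name.startswith("OUT:"):
--         return 10_000
--     if node_name.startswith("L") and "." in node_name:
--         try:
--             block = int(node_name.split(".")[0][1:])
--         except Exception:
--             block = 0
--         if ".H" in node_name:
--             return block * 2
--         if ".N" in node_name: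
--             return block * 2 + 1
--         return block * 2
--     return 0
--
-- def _close(seed, es, stop):
--     vis = set(seed)
--     frontier = list(seed)
--     for _ in range(len(es) + 1):
--         nxt = []
--         for cur in frontier:
--             cl = _node_visual_layer(cur)
--             for s, t in es:
--                 if s == cur and _node_visual_layer(t) != cl and t not in vis:
--                     vis.add(t)
--                     if not t.startswith(stop):
--                         nxt.append(t)
--         frontier = nxt
--     return vis
--
-- def _expand_with_neighbors(selected, edges):
--     ups = _close(selected, [(t, s) for s, t in edges], "IN:")
--     downs = _close(selected, edges, "OUT:")
--     return ups | downs
-- ===== Notes on version B (the rewrite author's own statement) =====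
-- stated objective: alternative
-- what changed: Replaces A's precomputed preds/succs adjacency dicts and single FIFO queue per direction with a bounded fixpoint: len(edges)+1 level-synchronous rounds that rescan the raw edges list for each frontier node (edges reversed for upstream, as-is for downstream), unioning the two closures.
import Mathlib
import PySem

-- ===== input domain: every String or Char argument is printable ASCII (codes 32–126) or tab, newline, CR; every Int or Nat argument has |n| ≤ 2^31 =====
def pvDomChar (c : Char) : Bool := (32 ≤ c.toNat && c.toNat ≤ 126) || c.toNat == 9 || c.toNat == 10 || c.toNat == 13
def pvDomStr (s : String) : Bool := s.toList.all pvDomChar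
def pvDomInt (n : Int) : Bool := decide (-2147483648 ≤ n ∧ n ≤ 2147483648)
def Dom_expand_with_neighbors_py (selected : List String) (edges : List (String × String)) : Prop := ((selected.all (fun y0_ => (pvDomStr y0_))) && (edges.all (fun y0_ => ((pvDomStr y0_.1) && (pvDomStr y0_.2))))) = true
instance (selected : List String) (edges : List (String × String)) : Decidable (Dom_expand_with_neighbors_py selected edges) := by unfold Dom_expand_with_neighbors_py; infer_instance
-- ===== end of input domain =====

-- B replaces A's preds/succs adjacency dicts and FIFO BFS queue by a bounded fixpoint:
-- len(edges)+1 level-synchronous rounds, each rescanning the raw edges list per frontier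
-- node; the two direction closures are unioned. Same result set (order included).
-- Python returns a set; both ports return it as a PySem.Set list and the theorem proves
-- the lists themselves equal.

-- ===== PORT A =====
-- port of A's _node_visual_layer
def pvLayer (name : String) : Int :=
  if PySem.Str.startswith name "IN:" then -1
  else if PySem.Str.startswith name "OUT:" then 10000
  else if PySem.Str.startswith name "L" && PySem.Str.isIn "." name then
    let block : Int :=
      (PySem.Int.ofStr? (PySem.Str.slice (((PySem.Str.split? name ".").getD []).headD "") (some 1) none)).getD 0
    if PySem.Str.isIn ".H" name then block * 2
    else if PySem.Str.isIn ".N" name then block * 2 + 1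
    else block * 2
  else 0

-- number of universe elements not yet visited (termination measure for A's while-loops)
def pvFresh (univ : List String) (v : PySem.Set String) : Nat :=
  (univ.filter (fun x => !(PySem.Set.contains v x))).length

-- one pass over edges building preds (keyed by target) and succs (keyed by source)
def pvBuildMaps (edges : List (String × String)) :
    PySem.Dict String (PySem.Set String) × PySem.Dict String (PySem.Set String) :=
  edges.foldl
    (fun d e =>
      (d.1.modify e.2 PySem.Set.empty (fun s => PySem.Set.add s e.1),
       d.2.modify e.1 PySem.Set.empty (fun s => PySem.Set.add s e.2)))
    (PySem.Dict.empty, PySem.Dict.empty)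

-- body of A's inner `for p in preds.get(cur, set())` loop (state: queue, visited, out)
def pvBfsStep (cl : Int) (stop : String)
    (st : List String × PySem.Set String × PySem.Set String) (p : String) :
    List String × PySem.Set String × PySem.Set String :=
  if pvLayer p == cl then st
  else if PySem.Set.contains st.2.1 p then st
  else (st.1 ++ (if PySem.Str.startswith p stop then [] else [p]),
        PySem.Set.add st.2.1 p, PySem.Set.add st.2.2 p)

-- termination helpers for the BFS queue loop (measure facts only)
theorem length_filter_ne_lt {l : List String} {p : String} (hp : p ∈ l) :
    (l.filter (fun x => !(decide (x = p)))).length + 1 ≤ l.length := by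
  induction l with
  | nil => cases hp
  | cons y t ih =>
    by_cases hyp : y = p
    · subst hyp
      simp only [List.filter_cons, decide_true, Bool.not_true, Bool.false_eq_true, if_false, List.length_cons]
      have := List.length_filter_le (fun x => !(decide (x = y))) t
      omega
    · rcases List.mem_cons.mp hp with h | h
      · exact absurd h.symm hyp
      · have := ih h
        simp only [List.filter_cons, hyp, decide_false, Bool.not_false, List.length_cons, if_true]
        omega

theorem pvFresh_add_lt (univ : List String) (v : PySem.Set String) (p : String)
    (hp : p ∈ univ) (hc : PySem.Set.contains v p = false) :
    ((univ.filter (fun x => !(PySem.Set.contains (PySem.Set.add v p) x))).length) + 1 ≤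
    (univ.filter (fun x => !(PySem.Set.contains v x))).length := by
  have hpm : p ∉ v := by
    intro hm; rw [(PySem.Set.contains_iff v p).mpr hm] at hc; cases hc
  have hadd : PySem.Set.add v p = v ++ [p] := by simp [PySem.Set.add, hpm]
  rw [hadd]
  have hcongr : univ.filter (fun x => !(PySem.Set.contains (v ++ [p]) x))
      = (univ.filter (fun x => !(PySem.Set.contains v x))).filter (fun x => !(decide (x = p))) := by
    rw [List.filter_filter]
    apply List.filter_congr
    intro x _
    simp only [PySem.Set.contains, List.contains_eq_mem, List.mem_append, List.mem_singleton]
    by_cases h1 : x ∈ v <;> by_cases h2 : x = p <;> simp [h1, h2]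
  rw [hcongr]
  apply length_filter_ne_lt
  simp only [List.mem_filter, hp, true_and, hc, Bool.not_false]

theorem pvFresh_add_le (univ : List String) (v : PySem.Set String) (p : String)
    (hp : p ∈ univ) (hc : PySem.Set.contains v p = false) :
    pvFresh univ (PySem.Set.add v p) + 1 ≤ pvFresh univ v :=
  pvFresh_add_lt univ v p hp hc

theorem pvBfs_fold_measure (univ : List String) (cl : Int) (stop : String) :
    ∀ (ns q : List String) (v o : PySem.Set String), (∀ p ∈ ns, p ∈ univ) →
    pvFresh univ (ns.foldl (pvBfsStep cl stop) (q, v, o)).2.1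
      + (ns.foldl (pvBfsStep cl stop) (q, v, o)).1.length
    ≤ pvFresh univ v + q.length := by
  intro ns
  induction ns with
  | nil => intro q v o _; simp
  | cons p ns ih =>
    intro q v o hsub
    simp only [List.foldl_cons]
    have hp := hsub p (List.mem_cons_self ..)
    have hsub' := fun x hx => hsub x (List.mem_cons_of_mem _ hx)
    by_cases hl : (pvLayer p == cl) = true
    · rw [show pvBfsStep cl stop (q, v, o) p = (q, v, o) from by simp [pvBfsStep, hl]]
      exact ih q v o hsub'
    · by_cases hc : PySem.Set.contains v p = true
      · have hm : p ∈ v := (PySem.Set.contains_iff v p).mp hc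
        rw [show pvBfsStep cl stop (q, v, o) p = (q, v, o) from by simp [pvBfsStep, hl, hm]]
        exact ih q v o hsub'
      · have hc' : PySem.Set.contains v p = false := by simpa using hc
        have hnm : p ∉ v := by intro hm; rw [(PySem.Set.contains_iff v p).mpr hm] at hc'; cases hc'
        rw [show pvBfsStep cl stop (q, v, o) p
            = (q ++ (if PySem.Str.startswith p stop then [] else [p]),
               PySem.Set.add v p, PySem.Set.add o p) from by simp [pvBfsStep, hl, hnm]]
        have hkey := pvFresh_add_le univ v p hp hc'
        have := ih (q ++ (if PySem.Str.startswith p stop then [] else [p]))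
          (PySem.Set.add v p) (PySem.Set.add o p) hsub'
        have hlen : (q ++ (if PySem.Str.startswith p stop then [] else [p])).length ≤ q.length + 1 := by
          split <;> simp
        omega

theorem pvMem_values_of_getD (d : PySem.Dict String (PySem.Set String)) (c p : String)
    (hp : p ∈ d.getD c PySem.Set.empty) : p ∈ d.values.flatten := by
  rcases d with ⟨items⟩
  induction items with
  | nil => simp [PySem.Dict.getD_eq_get?_getD, PySem.Dict.get?, PySem.Set.empty] at hp
  | cons kv rest ih =>
    rw [PySem.Dict.getD_eq_get?_getD] at hp
    rw [show (PySem.Dict.mk (kv :: rest)) = (PySem.Dict.mk ((kv.1, kv.2) :: rest)) from rfl] at hp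
    rw [PySem.Dict.get?_mk_cons] at hp
    by_cases hk : (kv.1 == c) = true
    · rw [if_pos hk] at hp
      simp only [Option.getD_some] at hp
      simp only [PySem.Dict.values_mk, List.map_cons, List.flatten_cons, List.mem_append]
      exact Or.inl hp
    · rw [if_neg hk] at hp
      rw [← PySem.Dict.getD_eq_get?_getD] at hp
      have := ih hp
      simp only [PySem.Dict.values_mk, List.map_cons, List.flatten_cons, List.mem_append]
      simp only [PySem.Dict.values_mk] at this
      exact Or.inr this

-- A's `while up_queue:` / `while down_queue:` loop (returns (visited, out))
def pvBfs (d : PySem.Dict String (PySem.Set String)) (stop : String) :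
    List String → PySem.Set String → PySem.Set String → PySem.Set String × PySem.Set String
  | [], visited, out => (visited, out)
  | cur :: rest, visited, out =>
    let st := (d.getD cur PySem.Set.empty).foldl (pvBfsStep (pvLayer cur) stop) (rest, visited, out)
    pvBfs d stop st.1 st.2.1 st.2.2
termination_by queue visited _ => pvFresh (d.values.flatten) visited + queue.length
decreasing_by
  have h := pvBfs_fold_measure (d.values.flatten) (pvLayer cur) stop
    (d.getD cur PySem.Set.empty) rest visited out
    (fun p hp => pvMem_values_of_getD d cur p hp)
  simp only [List.length_cons]
  omega

def expand_with_neighbors_py (selected : List String) (edges : List (String × String)) : List String :=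
  if selected.isEmpty then []
  else
    let maps := pvBuildMaps edges
    let out0 := PySem.Set.ofList selected
    let r1 := pvBfs maps.1 "IN:" selected (PySem.Set.ofList selected) out0
    let r2 := pvBfs maps.2 "OUT:" selected (PySem.Set.ofList selected) r1.2
    r2.2

-- ===== PORT B =====
-- B's own copy of _node_visual_layer (Source B defines its own)
def altLayer (name : String) : Int :=
  if PySem.Str.startswith name "IN:" then -1
  else if PySem.Str.startswith name "OUT:" then 10000
  else if PySem.Str.startswith name "L" && PySem.Str.isIn "." name then
    let block : Int :=
      (PySem.Int.ofStr? (PySem.Str.slice (((PySem.Str.split? name ".").getD []).headD "") (some 1) none)).getD 0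
    if PySem.Str.isIn ".H" name then block * 2
    else if PySem.Str.isIn ".N" name then block * 2 + 1
    else block * 2
  else 0

-- B's `for s, t in es:` scan for one frontier node cur (state: nxt, vis)
def altVisit (es : List (String × String)) (stop cur : String)
    (st : List String × PySem.Set String) : List String × PySem.Set String :=
  es.foldl (fun st e =>
    if e.1 == cur && !(altLayer e.2 == altLayer cur) && !(PySem.Set.contains st.2 e.2) then
      ((if PySem.Str.startswith e.2 stop then st.1 else st.1 ++ [e.2]), PySem.Set.add st.2 e.2)
    else st) st

-- B's `for _ in range(len(es) + 1):` loop — plain fuel recursion, one round per step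
def altClose (es : List (String × String)) (stop : String) :
    Nat → List String → PySem.Set String → PySem.Set String
  | 0, _, vis => vis
  | fuel + 1, frontier, vis =>
    let st := frontier.foldl (fun st cur => altVisit es stop cur st) ([], vis)
    altClose es stop fuel st.1 st.2

def expand_with_neighbors_py_alt (selected : List String) (edges : List (String × String)) : List String :=
  let revEdges := edges.map (fun e => (e.2, e.1))
  let ups := altClose revEdges "IN:" (revEdges.length + 1) selected (PySem.Set.ofList selected)
  let downs := altClose edges "OUT:" (edges.length + 1) selected (PySem.Set.ofList selected)
  PySem.Set.union ups downs

-- ===== PRECONDITION & SPEC =====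
def Spec_expand_with_neighbors_py (selected : List String) (edges : List (String × String)) (out : List String) : Prop := out = expand_with_neighbors_py_alt selected edges
instance (selected : List String) (edges : List (String × String)) (out : List String) : Decidable (Spec_expand_with_neighbors_py selected edges out) := by unfold Spec_expand_with_neighbors_py; infer_instance

-- ===== CLAIM (what is proved, stated in full; the proofs are below) =====
def Claim_equal_expand_with_neighbors_py : Prop := ∀ (selected : List String) (edges : List (String × String)), Dom_expand_with_neighbors_py selected edges → Spec_expand_with_neighbors_py selected edges (expand_with_neighbors_py selected edges)

-- ===== LEMMAS AND PROOFS =====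

-- proof-side bridge: the per-edge step of B, with uniform append shape
def pvReachStep (cl : Int) (cur stop : String)
    (st : List String × PySem.Set String) (e : String × String) :
    List String × PySem.Set String :=
  if e.1 == cur && !(pvLayer e.2 == cl) && !(PySem.Set.contains st.2 e.2) then
    (st.1 ++ (if PySem.Str.startswith e.2 stop then [] else [e.2]), PySem.Set.add st.2 e.2)
  else st

theorem pvReach_fold_measure (univ : List String) (cl : Int) (cur stop : String) :
    ∀ (es : List (String × String)) (q : List String) (v : PySem.Set String),
    (∀ e ∈ es, e.2 ∈ univ) →
    pvFresh univ (es.foldl (pvReachStep cl cur stop) (q, v)).2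
      + (es.foldl (pvReachStep cl cur stop) (q, v)).1.length
    ≤ pvFresh univ v + q.length := by
  intro es
  induction es with
  | nil => intro q v _; simp
  | cons e es ih =>
    intro q v hsub
    simp only [List.foldl_cons]
    have hp := hsub e (List.mem_cons_self ..)
    have hsub' := fun x hx => hsub x (List.mem_cons_of_mem _ hx)
    by_cases hcond : (e.1 == cur && !(pvLayer e.2 == cl) && !(PySem.Set.contains v e.2)) = true
    · have hc' : PySem.Set.contains v e.2 = false := by
        revert hcond; cases h : PySem.Set.contains v e.2 <;> simp
      rw [show pvReachStep cl cur stop (q, v) e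
          = (q ++ (if PySem.Str.startswith e.2 stop then [] else [e.2]), PySem.Set.add v e.2) from by
        simp only [pvReachStep, hcond, if_true]]
      have hkey := pvFresh_add_le univ v e.2 hp hc'
      have := ih (q ++ (if PySem.Str.startswith e.2 stop then [] else [e.2])) (PySem.Set.add v e.2) hsub'
      have hlen : (q ++ (if PySem.Str.startswith e.2 stop then [] else [e.2])).length ≤ q.length + 1 := by
        split <;> simp
      omega
    · rw [show pvReachStep cl cur stop (q, v) e = (q, v) from by
        simp only [pvReachStep, hcond, if_false, Bool.false_eq_true]]
      exact ih q v hsub'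

-- one level-synchronous round: expand every frontier node by scanning the raw edges list
def pvRound (es : List (String × String)) (stop : String) (front : List String)
    (st : List String × PySem.Set String) : List String × PySem.Set String :=
  front.foldl (fun st cur => es.foldl (pvReachStep (pvLayer cur) cur stop) st) st

theorem pvRound_measure (univ : List String) (stop : String) (es : List (String × String))
    (hs : ∀ e ∈ es, e.2 ∈ univ) :
    ∀ (front q : List String) (v : PySem.Set String),
    pvFresh univ (pvRound es stop front (q, v)).2 + (pvRound es stop front (q, v)).1.length
    ≤ pvFresh univ v + q.length := by
  intro front
  induction front with
  | nil => intro q v; simp [pvRound]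
  | cons c front ih =>
    intro q v
    simp only [pvRound, List.foldl_cons]
    have h1 := pvReach_fold_measure univ (pvLayer c) c stop es q v hs
    have h2 := ih (es.foldl (pvReachStep (pvLayer c) c stop) (q, v)).1
      (es.foldl (pvReachStep (pvLayer c) c stop) (q, v)).2
    simp only [pvRound, Prod.mk.eta] at h2
    omega

-- proof-side while-loop closure (B's loop run to an actual fixpoint)
def pvReach (es : List (String × String)) (stop : String)
    (frontier : List String) (visited : PySem.Set String) : PySem.Set String :=
  if _h : frontier = [] then visited
  else
    let st := pvRound es stop frontier (([] : List String), visited)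
    pvReach es stop st.1 st.2
termination_by pvFresh (es.map (·.2)) visited + frontier.length
decreasing_by
  have h2 := pvRound_measure (es.map (·.2)) stop es
    (fun e he => List.mem_map.mpr ⟨e, he, rfl⟩) frontier [] visited
  have h3 : frontier.length ≠ 0 := fun hl => _h (List.eq_nil_of_length_eq_zero hl)
  simp only [List.length_nil] at h2
  omega

-- neighbour list of `c` read off the raw edges list (B's scan; also what A's dicts hold)
def pvNb (E : List (String × String)) (c : String) : List String :=
  E.filterMap (fun e => if e.1 == c then some e.2 else none)

-- A's per-neighbour step with the passive `out` component dropped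
def pvPairStep (cl : Int) (stop : String)
    (st : List String × PySem.Set String) (p : String) : List String × PySem.Set String :=
  if pvLayer p == cl then st
  else if PySem.Set.contains st.2 p then st
  else (st.1 ++ (if PySem.Str.startswith p stop then [] else [p]), PySem.Set.add st.2 p)

theorem pvUnion_append (w a b : PySem.Set String) :
    PySem.Set.union w (a ++ b) = PySem.Set.union (PySem.Set.union w a) b :=
  List.foldl_append

theorem pvNotMem_of_contains_false {v : PySem.Set String} {p : String}
    (hc : PySem.Set.contains v p = false) : p ∉ v := by
  intro hm; rw [(PySem.Set.contains_iff v p).mpr hm] at hc; cases hc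

theorem pvAdd_eq_append {v : PySem.Set String} {p : String}
    (hc : PySem.Set.contains v p = false) : PySem.Set.add v p = v ++ [p] := by
  simp [PySem.Set.add, pvNotMem_of_contains_false hc]

theorem pvUnion_add (w v : PySem.Set String) (p : String)
    (hc : PySem.Set.contains v p = false) :
    PySem.Set.union w (PySem.Set.add v p) = PySem.Set.add (PySem.Set.union w v) p := by
  rw [pvAdd_eq_append hc, pvUnion_append]; rfl

-- the `out` set is determined by the visited set: out = w ∪ visited throughout A's loop
theorem pvTriple (cl : Int) (stop : String) :
    ∀ (ns q : List String) (v w : PySem.Set String),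
    ns.foldl (pvBfsStep cl stop) (q, v, PySem.Set.union w v)
      = ((ns.foldl (pvPairStep cl stop) (q, v)).1,
         (ns.foldl (pvPairStep cl stop) (q, v)).2,
         PySem.Set.union w (ns.foldl (pvPairStep cl stop) (q, v)).2) := by
  intro ns
  induction ns with
  | nil => intro q v w; rfl
  | cons p ns ih =>
    intro q v w
    simp only [List.foldl_cons]
    by_cases hl : (pvLayer p == cl) = true
    · rw [show pvBfsStep cl stop (q, v, PySem.Set.union w v) p = (q, v, PySem.Set.union w v) from by
        simp [pvBfsStep, hl]]
      rw [show pvPairStep cl stop (q, v) p = (q, v) from by simp [pvPairStep, hl]]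
      exact ih q v w
    · by_cases hc : PySem.Set.contains v p = true
      · have hm : p ∈ v := (PySem.Set.contains_iff v p).mp hc
        rw [show pvBfsStep cl stop (q, v, PySem.Set.union w v) p = (q, v, PySem.Set.union w v) from by
          simp [pvBfsStep, hl, hm]]
        rw [show pvPairStep cl stop (q, v) p = (q, v) from by simp [pvPairStep, hl, hm]]
        exact ih q v w
      · have hc' : PySem.Set.contains v p = false := by simpa using hc
        have hnm := pvNotMem_of_contains_false hc'
        rw [show pvBfsStep cl stop (q, v, PySem.Set.union w v) p
            = (q ++ (if PySem.Str.startswith p stop then [] else [p]),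
               PySem.Set.add v p, PySem.Set.add (PySem.Set.union w v) p) from by
          simp [pvBfsStep, hl, hnm]]
        rw [show pvPairStep cl stop (q, v) p
            = (q ++ (if PySem.Str.startswith p stop then [] else [p]), PySem.Set.add v p) from by
          simp [pvPairStep, hl, hnm]]
        rw [← pvUnion_add w v p hc']
        exact ih _ _ w

theorem pvContains_add_mono {v : PySem.Set String} {p : String} (y : String)
    (h : PySem.Set.contains v p = true) : PySem.Set.contains (PySem.Set.add v y) p = true := by
  have hm : p ∈ v := (PySem.Set.contains_iff v p).mp h
  apply (PySem.Set.contains_iff _ p).mpr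
  simp [PySem.Set.add]
  split <;> simp [hm]

theorem pvContains_add_self (v : PySem.Set String) (p : String) :
    PySem.Set.contains (PySem.Set.add v p) p = true := by
  apply (PySem.Set.contains_iff _ p).mpr
  simp [PySem.Set.add]
  split <;> simp_all

-- once p is dominated (same layer, or already visited) it stays a no-op
theorem pvErase (cl : Int) (stop : String) (p : String) :
    ∀ (l : List String) (st : List String × PySem.Set String),
    ((pvLayer p == cl) = true ∨ PySem.Set.contains st.2 p = true) →
    l.foldl (pvPairStep cl stop) st = (l.filter (fun y => !(y == p))).foldl (pvPairStep cl stop) st := by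
  intro l
  induction l with
  | nil => intro st _; rfl
  | cons y l ih =>
    intro st hst
    by_cases hy : (y == p) = true
    · have hyp : y = p := by simpa using hy
      subst hyp
      have hstep : pvPairStep cl stop st y = st := by
        rcases hst with h | h
        · simp [pvPairStep, h]
        · have hm : y ∈ st.2 := (PySem.Set.contains_iff _ y).mp h
          by_cases hl : (pvLayer y == cl) = true <;> simp [pvPairStep, hl, hm]
      simp only [List.foldl_cons, List.filter_cons, hy, Bool.not_true, Bool.false_eq_true, if_false]
      rw [hstep]
      exact ih st hst
    · have hst' : (pvLayer p == cl) = true ∨ PySem.Set.contains (pvPairStep cl stop st y).2 p = true := by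
        rcases hst with h | h
        · exact Or.inl h
        · right
          unfold pvPairStep
          split
          · exact h
          · split
            · exact h
            · exact pvContains_add_mono y h
      simp only [List.foldl_cons, List.filter_cons, hy, Bool.not_false, if_true]
      exact ih _ hst'

theorem pvDedup (cl : Int) (stop : String) :
    ∀ (l : List String) (st : List String × PySem.Set String),
    (PySem.Set.ofList l).foldl (pvPairStep cl stop) st = l.foldl (pvPairStep cl stop) st := by
  intro l
  induction l with
  | nil => intro st; rfl
  | cons p l ih =>
    intro st
    rw [PySem.Set.ofList_cons]
    have hdis : (PySem.Set.ofList l).discard p = (PySem.Set.ofList l).filter (fun y => !(y == p)) := rfl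
    rw [hdis]
    simp only [List.foldl_cons]
    have hstab : (pvLayer p == cl) = true ∨ PySem.Set.contains (pvPairStep cl stop st p).2 p = true := by
      by_cases hl : (pvLayer p == cl) = true
      · exact Or.inl hl
      · right
        unfold pvPairStep
        split
        · simp_all
        · split
          · assumption
          · exact pvContains_add_self _ _
    rw [← pvErase cl stop p (PySem.Set.ofList l) _ hstab]
    exact ih _

theorem pvFoldlCongr {α β : Type} (f g : β → α → β) (l : List α) (init : β)
    (h : ∀ st a, f st a = g st a) : l.foldl f init = l.foldl g init := by
  induction l generalizing init with
  | nil => rfl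
  | cons a l ih => simp only [List.foldl_cons, h]; exact ih _

-- B's guarded scan of the raw edges list is the fold over the neighbour list
theorem pvGuard (E : List (String × String)) (stop cur : String) :
    ∀ st, E.foldl (pvReachStep (pvLayer cur) cur stop) st
      = (pvNb E cur).foldl (pvPairStep (pvLayer cur) stop) st := by
  intro st
  rw [pvNb, List.foldl_filterMap]
  apply pvFoldlCongr
  intro st e
  by_cases he : (e.1 == cur) = true
  · by_cases h2 : (pvLayer e.2 == pvLayer cur) = true
    · simp [pvReachStep, pvPairStep, he, h2]
    · by_cases h3 : PySem.Set.contains st.2 e.2 = true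
      · have hm : e.2 ∈ st.2 := (PySem.Set.contains_iff _ _).mp h3
        simp [pvReachStep, pvPairStep, he, h2, hm]
      · have hm : e.2 ∉ st.2 := pvNotMem_of_contains_false (by simpa using h3)
        simp [pvReachStep, pvPairStep, he, h2, hm]
  · simp [pvReachStep, he]

theorem pvAppendPair (cl : Int) (stop : String) :
    ∀ (l q₀ q : List String) (v : PySem.Set String),
    l.foldl (pvPairStep cl stop) (q₀ ++ q, v)
      = (q₀ ++ (l.foldl (pvPairStep cl stop) (q, v)).1, (l.foldl (pvPairStep cl stop) (q, v)).2) := by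
  intro l
  induction l with
  | nil => intro q₀ q v; rfl
  | cons p l ih =>
    intro q₀ q v
    simp only [List.foldl_cons]
    unfold pvPairStep
    dsimp only
    split
    · exact ih q₀ q v
    · split
      · exact ih q₀ q v
      · rw [List.append_assoc]
        exact ih q₀ _ _

theorem pvAppendReach (E : List (String × String)) (stop cur : String) :
    ∀ (q₀ q : List String) (v : PySem.Set String),
    E.foldl (pvReachStep (pvLayer cur) cur stop) (q₀ ++ q, v)
      = (q₀ ++ (E.foldl (pvReachStep (pvLayer cur) cur stop) (q, v)).1,
         (E.foldl (pvReachStep (pvLayer cur) cur stop) (q, v)).2) := by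
  intro q₀ q v
  rw [pvGuard, pvGuard]
  exact pvAppendPair _ _ _ q₀ q v

theorem pvRoundAppend (es : List (String × String)) (stop : String) :
    ∀ (front q₀ q : List String) (v : PySem.Set String),
    pvRound es stop front (q₀ ++ q, v)
      = (q₀ ++ (pvRound es stop front (q, v)).1, (pvRound es stop front (q, v)).2) := by
  intro front
  induction front with
  | nil => intro q₀ q v; rfl
  | cons c front ih =>
    intro q₀ q v
    simp only [pvRound, List.foldl_cons]
    rw [pvAppendReach]
    have := ih q₀ (es.foldl (pvReachStep (pvLayer c) c stop) (q, v)).1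
      (es.foldl (pvReachStep (pvLayer c) c stop) (q, v)).2
    simp only [pvRound, Prod.mk.eta] at this
    exact this

-- per-node expansion: A's dict/set fold = B's raw-edge scan
theorem pvStepEq (d : PySem.Dict String (PySem.Set String)) (E : List (String × String))
    (stop : String) (hchar : ∀ c, d.getD c PySem.Set.empty = PySem.Set.ofList (pvNb E c))
    (cur : String) (q : List String) (v w : PySem.Set String) :
    (d.getD cur PySem.Set.empty).foldl (pvBfsStep (pvLayer cur) stop) (q, v, PySem.Set.union w v)
      = ((E.foldl (pvReachStep (pvLayer cur) cur stop) (q, v)).1,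
         (E.foldl (pvReachStep (pvLayer cur) cur stop) (q, v)).2,
         PySem.Set.union w (E.foldl (pvReachStep (pvLayer cur) cur stop) (q, v)).2) := by
  rw [hchar cur, pvTriple, pvDedup, ← pvGuard]

-- FIFO processing of a whole frontier equals one level-synchronous round
theorem pvRlemma (d : PySem.Dict String (PySem.Set String)) (E : List (String × String))
    (stop : String) (hchar : ∀ c, d.getD c PySem.Set.empty = PySem.Set.ofList (pvNb E c)) :
    ∀ (front pend : List String) (v w : PySem.Set String),
    pvBfs d stop (front ++ pend) v (PySem.Set.union w v)
      = pvBfs d stop (pend ++ (pvRound E stop front ([], v)).1)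
          (pvRound E stop front ([], v)).2
          (PySem.Set.union w (pvRound E stop front ([], v)).2) := by
  intro front
  induction front with
  | nil =>
    intro pend v w
    simp [pvRound]
  | cons cur fr ih =>
    intro pend v w
    have hunf : pvBfs d stop (cur :: (fr ++ pend)) v (PySem.Set.union w v)
        = pvBfs d stop
            ((d.getD cur PySem.Set.empty).foldl (pvBfsStep (pvLayer cur) stop) (fr ++ pend, v, PySem.Set.union w v)).1
            ((d.getD cur PySem.Set.empty).foldl (pvBfsStep (pvLayer cur) stop) (fr ++ pend, v, PySem.Set.union w v)).2.1
            ((d.getD cur PySem.Set.empty).foldl (pvBfsStep (pvLayer cur) stop) (fr ++ pend, v, PySem.Set.union w v)).2.2 := by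
      rw [pvBfs]
    rw [List.cons_append, hunf, pvStepEq d E stop hchar]
    have hsplit := pvAppendReach E stop cur (fr ++ pend) [] v
    rw [List.append_nil] at hsplit
    rw [hsplit]
    dsimp only
    rw [List.append_assoc]
    rw [ih (pend ++ (E.foldl (pvReachStep (pvLayer cur) cur stop) ([], v)).1)
        (E.foldl (pvReachStep (pvLayer cur) cur stop) ([], v)).2 w]
    have hround : pvRound E stop (cur :: fr) ([], v)
        = ((E.foldl (pvReachStep (pvLayer cur) cur stop) ([], v)).1
             ++ (pvRound E stop fr ([], (E.foldl (pvReachStep (pvLayer cur) cur stop) ([], v)).2)).1,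
           (pvRound E stop fr ([], (E.foldl (pvReachStep (pvLayer cur) cur stop) ([], v)).2)).2) := by
      simp only [pvRound, List.foldl_cons]
      have := pvRoundAppend E stop fr (E.foldl (pvReachStep (pvLayer cur) cur stop) ([], v)).1 []
        (E.foldl (pvReachStep (pvLayer cur) cur stop) ([], v)).2
      simp only [List.append_nil, pvRound, Prod.mk.eta] at this
      rw [← this]
    rw [hround]
    simp [List.append_assoc]

-- A's BFS = the while-loop level iteration (visited set; out stays w ∪ visited)
theorem pvMain (d : PySem.Dict String (PySem.Set String)) (E : List (String × String))
    (stop : String) (hchar : ∀ c, d.getD c PySem.Set.empty = PySem.Set.ofList (pvNb E c)) :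
    ∀ (frontier : List String) (v w : PySem.Set String),
    pvBfs d stop frontier v (PySem.Set.union w v)
      = (pvReach E stop frontier v, PySem.Set.union w (pvReach E stop frontier v)) := by
  intro frontier v
  induction frontier, v using pvReach.induct (es := E) (stop := stop) with
  | case1 v =>
    intro w
    have h1 : pvReach E stop [] v = v := by rw [pvReach]; exact dif_pos rfl
    have h0 : pvBfs d stop [] v (PySem.Set.union w v) = (v, PySem.Set.union w v) := by rw [pvBfs]
    rw [h1, h0]
  | case2 frontier v hne st ih =>
    intro w
    have hR := pvRlemma d E stop hchar frontier [] v w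
    rw [List.append_nil, List.nil_append] at hR
    have h2 : pvReach E stop frontier v
        = pvReach E stop (pvRound E stop frontier ([], v)).1 (pvRound E stop frontier ([], v)).2 := by
      rw [pvReach, dif_neg hne]
    rw [hR, h2]
    exact ih w

-- ===== bridge: B's fuel loop = the while-loop closure =====

theorem altLayer_eq_pvLayer : altLayer = pvLayer := rfl

-- B's per-node scan is the bridge scan
theorem pvAltVisit (es : List (String × String)) (stop cur : String) (st : List String × PySem.Set String) :
    altVisit es stop cur st = es.foldl (pvReachStep (pvLayer cur) cur stop) st := by
  unfold altVisit
  apply pvFoldlCongr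
  intro st e
  rw [pvReachStep, altLayer_eq_pvLayer]
  by_cases hcond : (e.1 == cur && !(pvLayer e.2 == pvLayer cur) && !(PySem.Set.contains st.2 e.2)) = true
  · rw [if_pos hcond, if_pos hcond]
    split <;> simp
  · rw [if_neg hcond, if_neg hcond]

-- B's round is the bridge round
theorem pvAltRound (es : List (String × String)) (stop : String) (front : List String)
    (st : List String × PySem.Set String) :
    front.foldl (fun st cur => altVisit es stop cur st) st = pvRound es stop front st := by
  unfold pvRound
  apply pvFoldlCongr
  intro st cur
  exact pvAltVisit es stop cur st

theorem pvAltClose_nil (es : List (String × String)) (stop : String) :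
    ∀ (fuel : Nat) (vis : PySem.Set String), altClose es stop fuel [] vis = vis := by
  intro fuel
  induction fuel with
  | zero => intro vis; rfl
  | succ n ih => intro vis; simp only [altClose, List.foldl_nil]; exact ih vis

theorem pvFresh_le (univ : List String) (v : PySem.Set String) : pvFresh univ v ≤ univ.length :=
  List.length_filter_le _ _

theorem pvReach_nil (es : List (String × String)) (stop : String) (vis : PySem.Set String) :
    pvReach es stop [] vis = vis := by
  rw [pvReach]; exact dif_pos rfl

theorem pvReach_step (es : List (String × String)) (stop : String)
    (front : List String) (vis : PySem.Set String) (hf : front ≠ []) :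
    pvReach es stop front vis
      = pvReach es stop (pvRound es stop front ([], vis)).1 (pvRound es stop front ([], vis)).2 := by
  conv_lhs => rw [pvReach]
  rw [dif_neg hf]

-- enough fuel: the fuel loop reaches the while-loop's fixpoint
theorem pvAltClose_reach (es : List (String × String)) (stop : String) :
    ∀ (fuel : Nat) (front : List String) (vis : PySem.Set String),
    pvFresh (es.map (·.2)) vis + front.length ≤ fuel →
    altClose es stop fuel front vis = pvReach es stop front vis := by
  intro fuel
  induction fuel with
  | zero =>
    intro front vis h
    have hf : front = [] := List.eq_nil_of_length_eq_zero (by omega)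
    subst hf
    rw [pvReach_nil]
    rfl
  | succ n ih =>
    intro front vis h
    by_cases hf : front = []
    · subst hf
      rw [pvAltClose_nil, pvReach_nil]
    · have hmeas := pvRound_measure (es.map (·.2)) stop es
        (fun e he => List.mem_map.mpr ⟨e, he, rfl⟩) front [] vis
      have hlen : 1 ≤ front.length := by
        cases front with
        | nil => exact absurd rfl hf
        | cons a l => simp
      simp only [List.length_nil] at hmeas
      have hrw : altClose es stop (n + 1) front vis
          = altClose es stop n (pvRound es stop front ([], vis)).1 (pvRound es stop front ([], vis)).2 := by
        simp only [altClose, pvAltRound]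
      rw [hrw, ih _ _ (by omega)]
      exact (pvReach_step es stop front vis hf).symm

-- with fuel = |es| + 1 no measure hypothesis is needed: round one brings the measure under |es|
theorem pvAltClose_full (es : List (String × String)) (stop : String)
    (front : List String) (vis : PySem.Set String) :
    altClose es stop (es.length + 1) front vis = pvReach es stop front vis := by
  by_cases hf : front = []
  · subst hf
    rw [pvAltClose_nil, pvReach_nil]
  · have hmeas := pvRound_measure (es.map (·.2)) stop es
      (fun e he => List.mem_map.mpr ⟨e, he, rfl⟩) front [] vis
    simp only [List.length_nil] at hmeas
    have hfresh := pvFresh_le (es.map (·.2)) vis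
    rw [List.length_map] at hfresh
    have hrw : altClose es stop (es.length + 1) front vis
        = altClose es stop es.length (pvRound es stop front ([], vis)).1 (pvRound es stop front ([], vis)).2 := by
      simp only [altClose, pvAltRound]
    rw [hrw, pvAltClose_reach es stop es.length _ _ (by omega)]
    exact (pvReach_step es stop front vis hf).symm

-- ===== facts about the while-loop closure needed to simplify the unions =====

theorem pvPairExt (cl : Int) (stop : String) :
    ∀ (l q : List String) (v : PySem.Set String), ∃ Δ, (l.foldl (pvPairStep cl stop) (q, v)).2 = v ++ Δ := by
  intro l
  induction l with
  | nil => intro q v; exact ⟨[], by simp⟩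
  | cons p l ih =>
    intro q v
    simp only [List.foldl_cons]
    by_cases hl : (pvLayer p == cl) = true
    · rw [show pvPairStep cl stop (q, v) p = (q, v) from by simp [pvPairStep, hl]]
      exact ih q v
    · by_cases hc : PySem.Set.contains v p = true
      · have hm := (PySem.Set.contains_iff v p).mp hc
        rw [show pvPairStep cl stop (q, v) p = (q, v) from by simp [pvPairStep, hl, hm]]
        exact ih q v
      · have hc' : PySem.Set.contains v p = false := by simpa using hc
        have hnm := pvNotMem_of_contains_false hc'
        rw [show pvPairStep cl stop (q, v) p
            = (q ++ (if PySem.Str.startswith p stop then [] else [p]), PySem.Set.add v p) from by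
          simp [pvPairStep, hl, hnm]]
        rcases ih (q ++ (if PySem.Str.startswith p stop then [] else [p])) (PySem.Set.add v p) with ⟨Δ, hΔ⟩
        refine ⟨p :: Δ, ?_⟩
        rw [hΔ, pvAdd_eq_append hc']
        simp

theorem pvRoundExt (es : List (String × String)) (stop : String) :
    ∀ (front q : List String) (v : PySem.Set String), ∃ Δ, (pvRound es stop front (q, v)).2 = v ++ Δ := by
  intro front
  induction front with
  | nil => intro q v; exact ⟨[], by simp [pvRound]⟩
  | cons c front ih =>
    intro q v
    simp only [pvRound, List.foldl_cons]
    rcases pvPairExt (pvLayer c) stop (pvNb es c) q v with ⟨Δ1, h1⟩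
    rw [← pvGuard es stop c] at h1
    rcases ih (es.foldl (pvReachStep (pvLayer c) c stop) (q, v)).1
      (es.foldl (pvReachStep (pvLayer c) c stop) (q, v)).2 with ⟨Δ2, h2⟩
    simp only [pvRound, Prod.mk.eta] at h2
    exact ⟨Δ1 ++ Δ2, by rw [h2, h1, List.append_assoc]⟩

theorem pvReachExt (es : List (String × String)) (stop : String) :
    ∀ (frontier : List String) (v : PySem.Set String), ∃ Δ, pvReach es stop frontier v = v ++ Δ := by
  intro frontier v
  induction frontier, v using pvReach.induct (es := es) (stop := stop) with
  | case1 v => exact ⟨[], by rw [pvReach]; rw [dif_pos rfl]; simp⟩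
  | case2 frontier v hne st ih =>
    rcases pvRoundExt es stop frontier [] v with ⟨Δ0, h0⟩
    have h0' : st.2 = v ++ Δ0 := h0
    rcases ih with ⟨Δ, hΔ⟩
    have hgoal : pvReach es stop frontier v = pvReach es stop st.1 st.2 := by
      rw [pvReach, dif_neg hne]
    exact ⟨Δ0 ++ Δ, by rw [hgoal, hΔ, h0', List.append_assoc]⟩

theorem pvPairNodup (cl : Int) (stop : String) :
    ∀ (l q : List String) (v : PySem.Set String), v.Nodup → (l.foldl (pvPairStep cl stop) (q, v)).2.Nodup := by
  intro l
  induction l with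
  | nil => intro q v h; exact h
  | cons p l ih =>
    intro q v h
    simp only [List.foldl_cons]
    by_cases hl : (pvLayer p == cl) = true
    · rw [show pvPairStep cl stop (q, v) p = (q, v) from by simp [pvPairStep, hl]]
      exact ih q v h
    · by_cases hc : PySem.Set.contains v p = true
      · have hm := (PySem.Set.contains_iff v p).mp hc
        rw [show pvPairStep cl stop (q, v) p = (q, v) from by simp [pvPairStep, hl, hm]]
        exact ih q v h
      · have hc' : PySem.Set.contains v p = false := by simpa using hc
        have hnm := pvNotMem_of_contains_false hc'
        rw [show pvPairStep cl stop (q, v) p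
            = (q ++ (if PySem.Str.startswith p stop then [] else [p]), PySem.Set.add v p) from by
          simp [pvPairStep, hl, hnm]]
        exact ih _ _ (PySem.Set.nodup_add v p h)

theorem pvRoundNodup (es : List (String × String)) (stop : String) :
    ∀ (front q : List String) (v : PySem.Set String), v.Nodup → (pvRound es stop front (q, v)).2.Nodup := by
  intro front
  induction front with
  | nil => intro q v h; exact h
  | cons c front ih =>
    intro q v h
    simp only [pvRound, List.foldl_cons]
    have h1 := pvPairNodup (pvLayer c) stop (pvNb es c) q v h
    rw [← pvGuard es stop c] at h1
    have := ih (es.foldl (pvReachStep (pvLayer c) c stop) (q, v)).1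
      (es.foldl (pvReachStep (pvLayer c) c stop) (q, v)).2 h1
    simp only [pvRound, Prod.mk.eta] at this
    exact this

theorem pvReachNodup (es : List (String × String)) (stop : String) :
    ∀ (frontier : List String) (v : PySem.Set String), v.Nodup → (pvReach es stop frontier v).Nodup := by
  intro frontier v
  induction frontier, v using pvReach.induct (es := es) (stop := stop) with
  | case1 v => intro h; rw [pvReach]; rw [dif_pos rfl]; exact h
  | case2 frontier v hne st ih =>
    intro h
    have hgoal : pvReach es stop frontier v = pvReach es stop st.1 st.2 := by
      rw [pvReach, dif_neg hne]
    rw [hgoal]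
    exact ih (pvRoundNodup es stop frontier [] v h)

theorem pvUnion_subset (s t : PySem.Set String) (h : ∀ x ∈ t, x ∈ s) :
    PySem.Set.union s t = s := by
  induction t generalizing s with
  | nil => rfl
  | cons x t ih =>
    have hx : x ∈ s := h x (List.mem_cons_self ..)
    have hadd : PySem.Set.add s x = s := by simp [PySem.Set.add, hx]
    have : PySem.Set.union s (x :: t) = PySem.Set.union (PySem.Set.add s x) t := rfl
    rw [this, hadd]
    exact ih s (fun y hy => h y (List.mem_cons_of_mem _ hy))

theorem pvUnion_disj : ∀ (Δ s : PySem.Set String), (s ++ Δ).Nodup → PySem.Set.union s Δ = s ++ Δ := by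
  intro Δ
  induction Δ with
  | nil => intro s _; show s = s ++ []; simp
  | cons x Δ ih =>
    intro s h
    have hx : x ∉ s := by
      intro hm
      exact (List.disjoint_of_nodup_append h) hm (List.mem_cons_self ..)
    have hadd : PySem.Set.add s x = s ++ [x] := by simp [PySem.Set.add, hx]
    have : PySem.Set.union s (x :: Δ) = PySem.Set.union (PySem.Set.add s x) Δ := rfl
    rw [this, hadd]
    have h' : ((s ++ [x]) ++ Δ).Nodup := by rwa [List.append_assoc, List.singleton_append]
    rw [ih (s ++ [x]) h', List.append_assoc, List.singleton_append]

theorem pvUnion_pref (s Δ : PySem.Set String) (h : (s ++ Δ).Nodup) :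
    PySem.Set.union s (s ++ Δ) = s ++ Δ := by
  rw [pvUnion_append]
  rw [pvUnion_subset s s (fun x hx => hx)]
  exact pvUnion_disj Δ s h

-- characterisation of A's preds/succs dictionaries
theorem pvDictChar : ∀ (ps : List (String × String)) (d : PySem.Dict String (PySem.Set String)) (c : String),
    ((ps.foldl (fun d e => d.modify e.2 PySem.Set.empty (fun s => PySem.Set.add s e.1)) d).getD c PySem.Set.empty)
      = (ps.filterMap (fun e => if e.2 == c then some e.1 else none)).foldl PySem.Set.add (d.getD c PySem.Set.empty) := by
  intro ps
  induction ps with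
  | nil => intro d c; rfl
  | cons e ps ih =>
    intro d c
    simp only [List.foldl_cons, List.filterMap_cons]
    rw [ih]
    rw [PySem.Dict.getD_modify]
    by_cases hc : e.2 = c
    · subst hc
      simp
    · have : (e.2 == c) = false := by simpa using hc
      simp [this, Ne.symm hc]

theorem pvBuild_proj : ∀ (es : List (String × String))
    (d1 d2 : PySem.Dict String (PySem.Set String)),
    es.foldl (fun d (e : String × String) =>
        (d.1.modify e.2 PySem.Set.empty (fun s => PySem.Set.add s e.1),
         d.2.modify e.1 PySem.Set.empty (fun s => PySem.Set.add s e.2))) (d1, d2)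
      = (es.foldl (fun d e => d.modify e.2 PySem.Set.empty (fun s => PySem.Set.add s e.1)) d1,
         es.foldl (fun d e => d.modify e.1 PySem.Set.empty (fun s => PySem.Set.add s e.2)) d2) := by
  intro es
  induction es with
  | nil => intro d1 d2; rfl
  | cons e es ih => intro d1 d2; simp only [List.foldl_cons]; exact ih _ _

theorem pvCharUp (edges : List (String × String)) (c : String) :
    (pvBuildMaps edges).1.getD c PySem.Set.empty
      = PySem.Set.ofList (pvNb (edges.map (fun e => (e.2, e.1))) c) := by
  unfold pvBuildMaps
  rw [pvBuild_proj]
  dsimp only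
  rw [pvDictChar]
  have h1 : (PySem.Dict.empty : PySem.Dict String (PySem.Set String)).getD c PySem.Set.empty = [] := rfl
  rw [h1]
  have h2 : pvNb (edges.map (fun e => (e.2, e.1))) c
      = edges.filterMap (fun e => if e.2 == c then some e.1 else none) := by
    rw [pvNb, List.filterMap_map]
    rfl
  rw [h2]
  rfl

theorem pvCharDn (edges : List (String × String)) (c : String) :
    (pvBuildMaps edges).2.getD c PySem.Set.empty = PySem.Set.ofList (pvNb edges c) := by
  unfold pvBuildMaps
  rw [pvBuild_proj]
  dsimp only
  have hswap : edges.foldl (fun d e => d.modify e.1 PySem.Set.empty (fun s => PySem.Set.add s e.2)) PySem.Dict.empty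
      = (edges.map (fun e => (e.2, e.1))).foldl
          (fun d e => d.modify e.2 PySem.Set.empty (fun s => PySem.Set.add s e.1)) PySem.Dict.empty := by
    rw [List.foldl_map]
  rw [hswap, pvDictChar]
  have h1 : (PySem.Dict.empty : PySem.Dict String (PySem.Set String)).getD c PySem.Set.empty = [] := rfl
  rw [h1]
  have h2 : (edges.map (fun e => (e.2, e.1))).filterMap (fun e => if e.2 == c then some e.1 else none)
      = pvNb edges c := by
    rw [List.filterMap_map, pvNb]
    rfl
  rw [h2]
  rfl

theorem expand_main : ∀ (selected : List String) (edges : List (String × String)),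
    expand_with_neighbors_py selected edges = expand_with_neighbors_py_alt selected edges := by
  intro selected edges
  have hlen : (edges.map (fun e => (e.2, e.1))).length = edges.length := List.length_map ..
  have h1 : altClose (edges.map (fun e => (e.2, e.1))) "IN:" (edges.length + 1) selected (PySem.Set.ofList selected)
      = pvReach (edges.map (fun e => (e.2, e.1))) "IN:" selected (PySem.Set.ofList selected) := by
    rw [← hlen]
    exact pvAltClose_full _ _ _ _
  have halt : expand_with_neighbors_py_alt selected edges
      = PySem.Set.union
          (pvReach (edges.map (fun e => (e.2, e.1))) "IN:" selected (PySem.Set.ofList selected))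
          (pvReach edges "OUT:" selected (PySem.Set.ofList selected)) := by
    simp only [expand_with_neighbors_py_alt]
    rw [hlen, h1, pvAltClose_full]
  by_cases hsel : selected.isEmpty
  · have h0 : selected = [] := List.isEmpty_iff.mp hsel
    subst h0
    have hra : ∀ (E : List (String × String)) (st : String),
        pvReach E st ([] : List String) (PySem.Set.ofList ([] : List String)) = [] := by
      intro E st; rw [pvReach]; exact dif_pos rfl
    rw [halt]
    simp only [expand_with_neighbors_py, List.isEmpty_nil, if_true, hra]
    rfl
  · rw [halt, expand_with_neighbors_py, if_neg hsel]
    set s := PySem.Set.ofList selected with hs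
    set Ru := pvReach (edges.map (fun e => (e.2, e.1))) "IN:" selected s with hRu
    set Rd := pvReach edges "OUT:" selected s with hRd
    have hss : PySem.Set.union s s = s := pvUnion_subset s s (fun x hx => hx)
    have hup := pvMain (pvBuildMaps edges).1 (edges.map (fun e => (e.2, e.1))) "IN:"
      (pvCharUp edges) selected s s
    rw [hss] at hup
    rcases pvReachExt (edges.map (fun e => (e.2, e.1))) "IN:" selected s with ⟨Δ, hΔ⟩
    have hnd : Ru.Nodup := pvReachNodup _ _ selected s (PySem.Set.nodup_ofList selected)
    have hRus : PySem.Set.union s Ru = Ru := by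
      rw [hRu, hΔ]
      exact pvUnion_pref s Δ (by rw [← hΔ, ← hRu]; exact hnd)
    rw [← hRu] at hup
    rw [hRus] at hup
    have hsub : ∀ x ∈ s, x ∈ Ru := by
      intro x hx
      rw [hRu, hΔ]
      exact List.mem_append.mpr (Or.inl hx)
    have hRuu : PySem.Set.union Ru s = Ru := pvUnion_subset Ru s hsub
    have hdn := pvMain (pvBuildMaps edges).2 edges "OUT:" (pvCharDn edges) selected s Ru
    rw [hRuu] at hdn
    rw [← hRd] at hdn
    simp only [hup, hdn]

-- ===== VERDICT (by name: the statement is the Claim_ definition above) =====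
theorem expand_with_neighbors_py_spec : Claim_equal_expand_with_neighbors_py := by
  intro selected edges _
  exact expand_main selected edges
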